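-- pv_equiv track=rewrite | github.com/Cvillas91/myPython | codeWars/6kyu.py | beggars
-- ===== SOURCE A (Python) =====
-- def beggars(values, n):
--     fin = []
--     for i in range(n):
--         sum = 0
--         for j in range(i, len(values), n):
--             sum += values[j]
--         fin.append(sum)
--     return fin
-- ===== SOURCE B (Python) =====
-- def beggars(values, n):
--     if n <= 0:
--         return []
--     fin = [0] * n
--     for idx, v in enumerate(values):
--         fin[idx % n] += v
--     return fin
-- ===== Notes on version B (the rewrite author's own statement) =====
-- stated objective: idiomatic
-- what changed: Replaces A's n independent strided inner loops (one range(i, len, n) scan per beggar) by a single enumerate pass that adds each value to bucket idx % n of a preallocated result, with an early [] return for n <= 0.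
import Mathlib
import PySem

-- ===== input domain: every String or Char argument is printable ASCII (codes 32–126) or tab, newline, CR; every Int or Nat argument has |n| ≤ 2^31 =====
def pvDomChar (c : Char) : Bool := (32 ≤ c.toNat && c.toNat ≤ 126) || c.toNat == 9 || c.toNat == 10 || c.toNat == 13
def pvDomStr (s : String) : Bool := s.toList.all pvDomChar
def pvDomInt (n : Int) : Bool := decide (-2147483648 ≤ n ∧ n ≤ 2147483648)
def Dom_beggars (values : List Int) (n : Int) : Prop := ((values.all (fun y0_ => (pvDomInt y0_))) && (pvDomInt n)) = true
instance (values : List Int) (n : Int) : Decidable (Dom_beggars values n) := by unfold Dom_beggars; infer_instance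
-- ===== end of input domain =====

-- B replaces A's n strided inner loops by one linear pass that routes values[idx] to bucket idx % n (idiomatic single sweep).

-- ===== PORT A =====
def beggars (values : List Int) (n : Int) : List Int :=
  (PySem.List.pyRange 0 n 1).foldl
    (fun fin i =>
      fin ++ [(PySem.List.pyRange i (values.length : Int) n).foldl
        (fun sum j => sum + PySem.List.pyGetD values j 0) 0])
    []

-- ===== PORT B =====
def beggars_alt (values : List Int) (n : Int) : List Int :=
  if n ≤ 0 then []
  else
    (PySem.List.enumerate values 0).foldl
      (fun fin p =>
        PySem.List.pySetD fin (PySem.Int.mod p.1 n)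
          (PySem.List.pyGetD fin (PySem.Int.mod p.1 n) 0 + p.2))
      (PySem.List.pyRepeat [0] n)

-- ===== PRECONDITION & SPEC =====
def Spec_beggars (values : List Int) (n : Int) (out : List Int) : Prop := out = beggars_alt values n
instance (values : List Int) (n : Int) (out : List Int) : Decidable (Spec_beggars values n out) := by unfold Spec_beggars; infer_instance

-- ===== CLAIM (what is proved, stated in full; the proofs are below) =====
def Claim_equal_beggars : Prop := ∀ (values : List Int) (n : Int), Dom_beggars values n → Spec_beggars values n (beggars values n)

-- ===== LEMMAS AND PROOFS =====

-- every n-th element of a list, starting at its head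
def strideList (m : Nat) : List Int → List Int
  | [] => []
  | v :: t => v :: strideList m (t.drop (m - 1))
termination_by l => l.length
decreasing_by simp

-- B's loop as a pure recursion on the list, carrying the current index residue r
def bfold (m : Nat) : List Int → Nat → List Int → List Int
  | [], _, acc => acc
  | v :: t, r, acc => bfold m t ((r + 1) % m) (acc.set r (acc.getD r 0 + v))

lemma pyRange_pos_eq_nil (a b s : Int) (hs : 0 < s) (h : b ≤ a) :
    PySem.List.pyRange a b s = [] := by
  rw [PySem.List.pyRange_of_pos a b hs]
  simp [show ¬ a < b by omega]

lemma pyRange_pos_cons (a b s : Int) (hs : 0 < s) (h : a < b) :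
    PySem.List.pyRange a b s = a :: PySem.List.pyRange (a + s) b s := by
  rw [PySem.List.pyRange_of_pos a b hs, PySem.List.pyRange_of_pos (a + s) b hs]
  rw [if_pos h]
  have hc : (b - a + s - 1) / s = (b - (a + s) + s - 1) / s + 1 := by
    have he : b - a + s - 1 = (b - (a + s) + s - 1) + 1 * s := by ring
    rw [he, Int.add_mul_ediv_right _ _ (by omega)]
  by_cases h2 : a + s < b
  · rw [if_pos h2, hc]
    have h0 : 0 ≤ (b - (a + s) + s - 1) / s := Int.ediv_nonneg (by omega) (by omega)
    rw [show ((b - (a + s) + s - 1) / s + 1).toNat = ((b - (a + s) + s - 1) / s).toNat + 1 by omega,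
      List.range_succ_eq_map]
    simp only [List.map_cons, List.map_map]
    congr 1
    · simp
    · apply List.map_congr_left
      intro k _
      simp only [Function.comp]
      push_cast
      ring
  · rw [if_neg h2, hc,
      show (b - (a + s) + s - 1) / s = 0 from Int.ediv_eq_zero_of_lt (by omega) (by omega)]
    simp

lemma strideMap (m : Nat) (hm : 0 < m) :
    ∀ (fuel : Nat) (vs : List Int) (k : Nat), vs.length - k ≤ fuel →
      (PySem.List.pyRange (k : Int) (vs.length : Int) (m : Int)).map
          (fun j => PySem.List.pyGetD vs j 0)
        = strideList m (vs.drop k) := by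
  intro fuel
  induction fuel with
  | zero =>
    intro vs k h
    rw [pyRange_pos_eq_nil _ _ _ (by exact_mod_cast hm) (by exact_mod_cast (by omega : vs.length ≤ k)),
      List.map_nil, List.drop_eq_nil_of_le (by omega)]
    simp [strideList]
  | succ f ih =>
    intro vs k h
    by_cases hk : k < vs.length
    · rw [pyRange_pos_cons _ _ _ (by exact_mod_cast hm) (by exact_mod_cast hk), List.map_cons,
        show ((k : Int) + m) = ((k + m : Nat) : Int) by push_cast; ring,
        ih vs (k + m) (by omega), PySem.List.pyGetD_natCast,
        List.drop_eq_getElem_cons hk, strideList, List.drop_drop,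
        show k + 1 + (m - 1) = k + m by omega, List.getD_eq_getElem vs 0 hk]
    · rw [pyRange_pos_eq_nil _ _ _ (by exact_mod_cast hm) (by exact_mod_cast (by omega : vs.length ≤ k)),
        List.map_nil, List.drop_eq_nil_of_le (by omega)]
      simp [strideList]

lemma pySetD_natCast (xs : List Int) (r : Nat) (v : Int) :
    PySem.List.pySetD xs (r : Int) v = xs.set r v := by
  by_cases h : r < xs.length
  · simp [PySem.List.pySetD, PySem.List.pySet?, PySem.List.pyIdx?, h]
  · have hs : xs.set r v = xs := List.set_eq_of_length_le (by omega)
    simp [PySem.List.pySetD, PySem.List.pySet?, PySem.List.pyIdx?, h, hs]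

lemma link (m : Nat) (_hm : 0 < m) :
    ∀ (vs : List Int) (s : Nat) (acc : List Int),
      (PySem.List.enumerate vs (s : Int)).foldl
        (fun fin p =>
          PySem.List.pySetD fin (PySem.Int.mod p.1 (m : Int))
            (PySem.List.pyGetD fin (PySem.Int.mod p.1 (m : Int)) 0 + p.2)) acc
      = bfold m vs (s % m) acc := by
  intro vs
  induction vs with
  | nil => intro s acc; rw [PySem.List.enumerate_nil, List.foldl_nil]; rfl
  | cons v t ih =>
    intro s acc
    rw [PySem.List.enumerate_cons, List.foldl_cons]
    simp only [PySem.Int.mod_natCast s m]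
    rw [pySetD_natCast, PySem.List.pyGetD_natCast,
      show ((s : Int) + 1) = ((s + 1 : Nat) : Int) by push_cast; ring, ih (s + 1) _]
    show bfold m t ((s + 1) % m) _ = bfold m (v :: t) (s % m) acc
    rw [show bfold m (v :: t) (s % m) acc
        = bfold m t ((s % m + 1) % m) (acc.set (s % m) (acc.getD (s % m) 0 + v)) from rfl]
    congr 1
    rw [Nat.add_mod s 1 m, Nat.add_mod (s % m) 1 m, Nat.mod_mod]

lemma bfold_length (m : Nat) :
    ∀ (vs : List Int) (r : Nat) (acc : List Int), (bfold m vs r acc).length = acc.length := by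
  intro vs
  induction vs with
  | nil => intro r acc; rfl
  | cons v t ih => intro r acc; simp [bfold, ih]

lemma dval (m r k : Nat) (hm : 0 < m) (hr : r < m) (hk : k < m) :
    (k + m - r) % m = if r ≤ k then k - r else k + m - r := by
  by_cases h : r ≤ k
  · rw [if_pos h, show k + m - r = (k - r) + m by omega, Nat.add_mod_right,
      Nat.mod_eq_of_lt (by omega)]
  · rw [if_neg h, Nat.mod_eq_of_lt (by omega)]

lemma modstep (m r k : Nat) (hm : 0 < m) (hr : r < m) (hk : k < m) :
    (k + m - (r + 1) % m) % m = if r = k then m - 1 else (k + m - r) % m - 1 := by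
  rw [dval m r k hm hr hk]
  by_cases he : r + 1 = m
  · rw [show (r + 1) % m = 0 by rw [he, Nat.mod_self],
      show k + m - 0 = k + m by omega, Nat.add_mod_right, Nat.mod_eq_of_lt hk]
    by_cases hrk : r = k
    · rw [if_pos hrk]; omega
    · rw [if_neg hrk, if_neg (show ¬ r ≤ k by omega)]; omega
  · rw [Nat.mod_eq_of_lt (show r + 1 < m by omega),
      dval m (r + 1) k hm (by omega) hk]
    by_cases hrk : r = k
    · subst hrk; rw [if_neg (show ¬ r + 1 ≤ r by omega), if_pos rfl]; omega
    · rw [if_neg hrk]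
      by_cases h2 : r ≤ k
      · rw [if_pos (show r + 1 ≤ k by omega), if_pos h2]; omega
      · rw [if_neg (show ¬ r + 1 ≤ k by omega), if_neg h2]; omega

lemma bfold_getD (m : Nat) (hm : 0 < m) :
    ∀ (vs : List Int) (r : Nat) (acc : List Int) (k : Nat),
      r < m → k < m → acc.length = m →
      (bfold m vs r acc).getD k 0
        = acc.getD k 0 + (strideList m (vs.drop ((k + m - r) % m))).sum := by
  intro vs
  induction vs with
  | nil => intro r acc k hr hk hacc; simp [bfold, strideList]
  | cons v t ih =>
    intro r acc k hr hk hacc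
    rw [show bfold m (v :: t) r acc
        = bfold m t ((r + 1) % m) (acc.set r (acc.getD r 0 + v)) from rfl,
      ih ((r + 1) % m) _ k (Nat.mod_lt _ hm) hk (by simp [hacc]),
      modstep m r k hm hr hk]
    have hset : (acc.set r (acc.getD r 0 + v)).getD k 0
        = if r = k then acc.getD r 0 + v else acc.getD k 0 := by
      rw [List.getD_eq_getElem?_getD, List.getElem?_set]
      split_ifs with h1 h2
      · rfl
      · exact absurd (by omega : r < acc.length) h2
      · exact (List.getD_eq_getElem?_getD).symm
    rw [hset]
    by_cases hrk : r = k
    · rw [if_pos hrk, if_pos hrk]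
      subst hrk
      rw [show (r + m - r) % m = 0 by rw [show r + m - r = m by omega, Nat.mod_self],
        List.drop_zero, strideList, List.sum_cons]
      ring
    · rw [if_neg hrk, if_neg hrk]
      have hd : 1 ≤ (k + m - r) % m := by
        rw [dval m r k hm hr hk]; split_ifs with h2 <;> omega
      conv_rhs => rw [show (k + m - r) % m = ((k + m - r) % m - 1) + 1 by omega,
        List.drop_succ_cons]

-- ===== VERDICT (by name: the statement is the Claim_ definition above) =====
theorem beggars_spec : Claim_equal_beggars := by
  intro values n _
  unfold Spec_beggars beggars beggars_alt
  by_cases hn : n ≤ 0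
  · rw [if_pos hn, pyRange_pos_eq_nil 0 n 1 (by omega) hn]; rfl
  · rw [if_neg hn]
    have hm0 : 0 < n.toNat := by omega
    have hnm : n = (n.toNat : Int) := by omega
    rw [hnm]
    rw [PySem.List.foldl_append_singleton_eq_map, List.nil_append,
      PySem.List.pyRange_zero_natCast, List.map_map]
    rw [List.map_congr_left (g := fun k : Nat => (strideList n.toNat (values.drop k)).sum)
      (fun k _ => by
        simp only [Function.comp]
        rw [PySem.List.foldl_add, strideMap n.toNat hm0 values.length values k (by omega)]
        simp)]
    rw [PySem.List.pyRepeat_singleton, show ((n.toNat : Int)).toNat = n.toNat from Int.toNat_natCast _]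
    have hB := link n.toNat hm0 values 0 (List.replicate n.toNat 0)
    rw [Nat.cast_zero, Nat.zero_mod] at hB
    rw [hB]
    apply List.ext_getElem
    · rw [bfold_length]; simp
    · intro k h1 h2
      have hk : k < n.toNat := by simpa using h1
      rw [List.getElem_map, List.getElem_range,
        ← List.getD_eq_getElem _ 0 h2,
        bfold_getD n.toNat hm0 values 0 _ k hm0 hk (by simp),
        show (k + n.toNat - 0) % n.toNat = k by
          rw [show k + n.toNat - 0 = k + n.toNat by omega, Nat.add_mod_right, Nat.mod_eq_of_lt hk]]
      simp
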